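-- pv_equiv track=rewrite | github.com/paul-dae/epr_exercises | EPR_Aufgabe_03_Paul_Daechert_Eike_Henrich.py | create_hint
-- ===== SOURCE A (Python) =====
-- def create_hint(player_code, current_code):
--     """create_hint is the function to create hints of the player code.
--
--     The function returns three strings in a list, one for each hint"""
--     hint_colour = 0
--     hint_shape = 0
--     hint_both = 0
--     for y in range(4):
--         code_piece = current_code[y]    #check every stone of the playercode
--         check_piece = player_code[y]
--         code_colour = code_piece[0]
--         code_shape = code_piece[1]
--         check_colour = check_piece[0]
--         check_shape = check_piece[1]
--         if code_colour == check_colour: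
--             if code_shape == check_shape:
--                 hint_both += 1
--             else:
--                 hint_colour += 1
--         elif code_shape == check_shape:
--             hint_shape += 1
--     return ["Number of correct colours:            %d" % (hint_colour),
--             "Number of correct shapes:             %d" % (hint_shape),
--             "Number of correct colours AND shapes: %d" % (hint_both)]
-- ===== SOURCE B (Python) =====
-- def create_hint(player_code, current_code):
--     """create_hint is the function to create hints of the player code.
--
--     The function returns three strings in a list, one for each hint"""
--     pairs = [(current_code[y], player_code[y]) for y in range(4)]
--     colours = sum(1 for cp, pp in pairs if cp[0] == pp[0])
--     shapes = sum(1 for cp, pp in pairs if cp[1] == pp[1])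
--     both = sum(1 for cp, pp in pairs if cp[0] == pp[0] and cp[1] == pp[1])
--     return ["Number of correct colours:            %d" % (colours - both),
--             "Number of correct shapes:             %d" % (shapes - both),
--             "Number of correct colours AND shapes: %d" % (both)]
-- ===== Notes on version B (the rewrite author's own statement) =====
-- stated objective: alternative
-- what changed: Replaced A's single loop with a nested if/elif classification into three mutually exclusive counters by three independent match tallies (colour, shape, full) over the four positions, deriving the reported exclusive counts arithmetically as colours-both and shapes-both.
import Mathlib
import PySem

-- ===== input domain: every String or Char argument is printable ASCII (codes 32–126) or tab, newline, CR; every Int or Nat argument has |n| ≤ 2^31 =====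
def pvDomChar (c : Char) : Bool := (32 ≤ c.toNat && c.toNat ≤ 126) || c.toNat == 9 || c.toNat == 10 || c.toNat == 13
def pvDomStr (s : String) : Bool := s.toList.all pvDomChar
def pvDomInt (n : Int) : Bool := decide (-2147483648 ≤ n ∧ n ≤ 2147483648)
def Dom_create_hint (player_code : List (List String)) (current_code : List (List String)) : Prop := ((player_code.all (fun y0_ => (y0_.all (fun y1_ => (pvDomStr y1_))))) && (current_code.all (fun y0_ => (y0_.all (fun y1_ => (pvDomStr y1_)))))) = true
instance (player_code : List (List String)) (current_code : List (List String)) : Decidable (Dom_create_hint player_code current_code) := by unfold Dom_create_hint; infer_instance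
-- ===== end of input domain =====

-- B replaces A's if/elif classification into three exclusive counters by three
-- independent match tallies and derives the exclusive counts by subtraction (objective: alternative).

-- ===== PORT A =====
-- loop 'for y in range(4)' over state (hint_colour, hint_shape, hint_both)
def create_hint (player_code : List (List String)) (current_code : List (List String)) : List String :=
  let st := (PySem.List.pyRange 0 4 1).foldl (fun (st : Int × Int × Int) y =>
    let code_piece := PySem.List.pyGetD current_code y []
    let check_piece := PySem.List.pyGetD player_code y []
    let code_colour := PySem.List.pyGetD code_piece 0 ""
    let code_shape := PySem.List.pyGetD code_piece 1 ""
    let check_colour := PySem.List.pyGetD check_piece 0 ""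
    let check_shape := PySem.List.pyGetD check_piece 1 ""
    if code_colour == check_colour then
      if code_shape == check_shape then (st.1, st.2.1, st.2.2 + 1)
      else (st.1 + 1, st.2.1, st.2.2)
    else if code_shape == check_shape then (st.1, st.2.1 + 1, st.2.2)
    else st) (0, 0, 0)
  ["Number of correct colours:            " ++ PySem.Int.toStr st.1,
   "Number of correct shapes:             " ++ PySem.Int.toStr st.2.1,
   "Number of correct colours AND shapes: " ++ PySem.Int.toStr st.2.2]

-- ===== PORT B =====
def create_hint_alt (player_code : List (List String)) (current_code : List (List String)) : List String :=
  let pairs := (PySem.List.pyRange 0 4 1).map (fun y =>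
    (PySem.List.pyGetD current_code y [], PySem.List.pyGetD player_code y []))
  let colours : Int := pairs.countP (fun p =>
    PySem.List.pyGetD p.1 0 "" == PySem.List.pyGetD p.2 0 "")
  let shapes : Int := pairs.countP (fun p =>
    PySem.List.pyGetD p.1 1 "" == PySem.List.pyGetD p.2 1 "")
  let both : Int := pairs.countP (fun p =>
    PySem.List.pyGetD p.1 0 "" == PySem.List.pyGetD p.2 0 "" &&
    PySem.List.pyGetD p.1 1 "" == PySem.List.pyGetD p.2 1 "")
  ["Number of correct colours:            " ++ PySem.Int.toStr (colours - both),
   "Number of correct shapes:             " ++ PySem.Int.toStr (shapes - both),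
   "Number of correct colours AND shapes: " ++ PySem.Int.toStr both]

-- ===== PRECONDITION & SPEC =====
-- Pre_ excludes exactly the inputs on which the Python A raises IndexError:
-- fewer than 4 code pieces in either list, or one of the first four pieces shorter than 2.
def Pre_create_hint (player_code : List (List String)) (current_code : List (List String)) : Prop :=
  4 ≤ player_code.length ∧ 4 ≤ current_code.length ∧
  (∀ p ∈ player_code.take 4, 2 ≤ p.length) ∧ (∀ p ∈ current_code.take 4, 2 ≤ p.length)
instance (player_code : List (List String)) (current_code : List (List String)) : Decidable (Pre_create_hint player_code current_code) := by unfold Pre_create_hint; infer_instance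

def pvWitness_create_hint : List (List String) × List (List String) :=
  ([["r","c"],["g","s"],["b","t"],["y","d"]], [["r","s"],["g","s"],["y","t"],["b","d"]])

def Spec_create_hint (player_code : List (List String)) (current_code : List (List String)) (out : List String) : Prop := out = create_hint_alt player_code current_code
instance (player_code : List (List String)) (current_code : List (List String)) (out : List String) : Decidable (Spec_create_hint player_code current_code out) := by unfold Spec_create_hint; infer_instance

-- ===== CLAIM (what is proved, stated in full; the proofs are below) =====
def Claim_equal_create_hint : Prop := ∀ (player_code : List (List String)) (current_code : List (List String)), Dom_create_hint player_code current_code → Pre_create_hint player_code current_code → Spec_create_hint player_code current_code (create_hint player_code current_code)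

-- ===== LEMMAS AND PROOFS =====

-- ===== VERDICT (by name: the statement is the Claim_ definition above) =====
set_option maxHeartbeats 4000000 in
theorem create_hint_spec : Claim_equal_create_hint := by
  intro pc cc _ _
  unfold Spec_create_hint create_hint create_hint_alt
  have hr : PySem.List.pyRange 0 4 1 = [0, 1, 2, 3] := by decide
  rw [hr]
  simp only [List.foldl, List.map, List.countP, List.countP.go]
  generalize (PySem.List.pyGetD (PySem.List.pyGetD cc 0 []) 0 "" == PySem.List.pyGetD (PySem.List.pyGetD pc 0 []) 0 "") = b0
  generalize (PySem.List.pyGetD (PySem.List.pyGetD cc 0 []) 1 "" == PySem.List.pyGetD (PySem.List.pyGetD pc 0 []) 1 "") = t0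
  generalize (PySem.List.pyGetD (PySem.List.pyGetD cc 1 []) 0 "" == PySem.List.pyGetD (PySem.List.pyGetD pc 1 []) 0 "") = b1
  generalize (PySem.List.pyGetD (PySem.List.pyGetD cc 1 []) 1 "" == PySem.List.pyGetD (PySem.List.pyGetD pc 1 []) 1 "") = t1
  generalize (PySem.List.pyGetD (PySem.List.pyGetD cc 2 []) 0 "" == PySem.List.pyGetD (PySem.List.pyGetD pc 2 []) 0 "") = b2
  generalize (PySem.List.pyGetD (PySem.List.pyGetD cc 2 []) 1 "" == PySem.List.pyGetD (PySem.List.pyGetD pc 2 []) 1 "") = t2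
  generalize (PySem.List.pyGetD (PySem.List.pyGetD cc 3 []) 0 "" == PySem.List.pyGetD (PySem.List.pyGetD pc 3 []) 0 "") = b3
  generalize (PySem.List.pyGetD (PySem.List.pyGetD cc 3 []) 1 "" == PySem.List.pyGetD (PySem.List.pyGetD pc 3 []) 1 "") = t3
  revert b0 t0 b1 t1 b2 t2 b3 t3
  decide
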